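-- pv_equiv track=rewrite | github.com/lepetitprinz/coding-challenge-auto-push | 프로그래머스/lv1/42889. 실패율/실패율.py | set_count_and_cum_count
-- ===== SOURCE A (Python) =====
-- from collections import Counter
--
-- def set_count_and_cum_count(n, stages):
--     count_map = dict(Counter(stages))
--     cum_count_map = {}
--     for i in range(n+1, 0, -1):
--         cnt = count_map.get(i, 0)
--         if i == n+1:
--             cum_cnt = cnt
--         else:
--             cum_cnt = cum_count_map[i+1] + cnt
--         cum_count_map[i] = cum_cnt
--
--     return count_map, cum_count_map
-- ===== SOURCE B (Python) =====
-- from collections import Counter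
--
-- def set_count_and_cum_count(n, stages):
--     count_map = dict(Counter(stages))
--     top = n + 1
--     # forward pass: 'reached' = players currently at stage >= i (within 1..top)
--     reached = sum(1 for x in stages if 1 <= x <= top)
--     suffix = []                      # suffix[i-1] = count of stages in [i, top]
--     for i in range(1, top + 1):
--         suffix.append(reached)
--         reached -= count_map.get(i, 0)
--     cum_count_map = {i: suffix[i - 1] for i in range(top, 0, -1)}
--     return count_map, cum_count_map
-- ===== Notes on version B (the rewrite author's own statement) =====
-- stated objective: alternative
-- what changed: Replaces A's backward accumulating dict pass (with an i==n+1 special case and a read-back of cum_count_map[i+1]) by a forward decrementing remaining-count pass that fills a plain list, followed by a descending dict comprehension; the running quantity maintained is the downward remaining count instead of an upward accumulator read from the dict.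
import Mathlib
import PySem

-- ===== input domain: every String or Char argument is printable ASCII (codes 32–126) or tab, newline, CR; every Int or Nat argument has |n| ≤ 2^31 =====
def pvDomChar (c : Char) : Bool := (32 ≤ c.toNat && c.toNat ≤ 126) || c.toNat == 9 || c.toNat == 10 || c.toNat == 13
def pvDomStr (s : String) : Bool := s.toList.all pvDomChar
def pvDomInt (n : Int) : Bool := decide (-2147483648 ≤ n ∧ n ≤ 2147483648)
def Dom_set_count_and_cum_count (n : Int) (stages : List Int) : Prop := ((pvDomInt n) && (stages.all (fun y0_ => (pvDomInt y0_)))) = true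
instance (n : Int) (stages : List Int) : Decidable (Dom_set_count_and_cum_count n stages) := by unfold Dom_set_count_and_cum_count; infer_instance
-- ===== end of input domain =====

-- B replaces A's backward accumulating dict pass (with its i == n+1 special case and dict
-- read-back) by a forward decrementing remaining-count pass into a list plus a descending
-- dict comprehension; same cost, alternative decomposition.


-- ===== PORT A =====
def set_count_and_cum_count (n : Int) (stages : List Int) : (List (Int × Int)) × (List (Int × Int)) :=
  let count_map := PySem.Dict.counter stages
  let cum_count_map := (PySem.List.pyRange (n+1) 0 (-1)).foldl
    (fun (cum : PySem.Dict Int Int) i =>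
      let cnt := count_map.getD i 0
      -- cum_count_map[i+1]: on every execution the key i+1 is present here (the first
      -- iteration takes the i == n+1 branch), so Python's KeyError is unreachable;
      -- ported via get? with .getD 0 on the unreachable none case
      let cum_cnt := if i == n + 1 then cnt else (cum.get? (i+1)).getD 0 + cnt
      cum.insert i cum_cnt)
    PySem.Dict.empty
  (count_map.items, cum_count_map.items)

-- ===== PORT B =====
def set_count_and_cum_count_alt (n : Int) (stages : List Int) : (List (Int × Int)) × (List (Int × Int)) :=
  let count_map := PySem.Dict.counter stages
  let top := n + 1
  let reached := stages.foldl (fun acc x => if 1 ≤ x ∧ x ≤ top then acc + 1 else acc) 0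
  let p := (PySem.List.pyRange 1 (top+1)).foldl
    (fun (p : List Int × Int) i => (p.1 ++ [p.2], p.2 - count_map.getD i 0)) ([], reached)
  let suffix := p.1
  let cum_count_map := (PySem.List.pyRange top 0 (-1)).foldl
    -- suffix[i-1]: i-1 is always a valid index here, so Python's IndexError is unreachable; pyGetD 0
    (fun (d : PySem.Dict Int Int) i => d.insert i (PySem.List.pyGetD suffix (i-1) 0))
    PySem.Dict.empty
  (count_map.items, cum_count_map.items)

-- ===== PRECONDITION & SPEC =====
def Spec_set_count_and_cum_count (n : Int) (stages : List Int) (out : (List (Int × Int)) × (List (Int × Int))) : Prop := out = set_count_and_cum_count_alt n stages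
instance (n : Int) (stages : List Int) (out : (List (Int × Int)) × (List (Int × Int))) : Decidable (Spec_set_count_and_cum_count n stages out) := by unfold Spec_set_count_and_cum_count; infer_instance

-- ===== CLAIM (what is proved, stated in full; the proofs are below) =====
def Claim_equal_set_count_and_cum_count : Prop := ∀ (n : Int) (stages : List Int), Dom_set_count_and_cum_count n stages → Spec_set_count_and_cum_count n stages (set_count_and_cum_count n stages)

-- ===== LEMMAS AND PROOFS =====

-- sfx top stages i = number of stage values lying in [i, top] (with multiplicity)
def sfx (top : Int) (stages : List Int) (i : Int) : Int :=
  ((PySem.List.pyRange i (top+1)).map (fun j => (stages.count j : Int))).sum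

theorem sfx_step (top : Int) (stages : List Int) (i : Int) (h : i ≤ top) :
    sfx top stages i = (stages.count i : Int) + sfx top stages (i+1) := by
  unfold sfx
  rw [PySem.List.pyRange_one_cons (by omega)]
  simp

theorem sfx_end (top : Int) (stages : List Int) : sfx top stages (top+1) = 0 := by
  unfold sfx
  rw [PySem.List.pyRange_one_eq_nil (by omega)]
  simp

-- A's backward loop: starting below i with the suffix count for i+1 available, it appends
-- the pairs (j, sfx j) for j = i, i-1, …, 1
theorem loopA (n : Int) (stages : List Int) :
    ∀ (k : Nat) (i : Int), i = (k : Int) → i ≤ n + 1 →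
    ∀ (d : PySem.Dict Int Int),
      (∀ j : Int, 1 ≤ j → j ≤ i → d.contains j = false) →
      (i < n + 1 → d.get? (i+1) = some (sfx (n+1) stages (i+1))) →
      ((PySem.List.pyRange i 0 (-1)).foldl
        (fun (cum : PySem.Dict Int Int) i =>
          cum.insert i (if i == n + 1 then (PySem.Dict.counter stages).getD i 0
            else (cum.get? (i+1)).getD 0 + (PySem.Dict.counter stages).getD i 0)) d).items
        = d.items ++ (PySem.List.pyRange i 0 (-1)).map (fun j => (j, sfx (n+1) stages j)) := by
  intro k
  induction k with
  | zero =>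
    intro i hik _ d _ _
    have h0 : i = 0 := by omega
    rw [h0, PySem.List.pyRange_neg_one_eq_nil (by omega)]
    simp
  | succ m ih =>
    intro i hik hin d hfresh hget
    rw [PySem.List.pyRange_neg_one_cons (by omega)]
    simp only [List.foldl_cons, List.map_cons]
    have hval : (if i == n + 1 then (PySem.Dict.counter stages).getD i 0
        else (d.get? (i+1)).getD 0 + (PySem.Dict.counter stages).getD i 0)
        = sfx (n+1) stages i := by
      rw [PySem.Dict.getD_counter]
      by_cases hi : i = n + 1
      · rw [if_pos (by simpa), hi, sfx_step (n+1) stages (n+1) le_rfl, sfx_end]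
        ring
      · rw [if_neg (by simpa), hget (by omega), sfx_step (n+1) stages i (by omega)]
        simp [add_comm]
    rw [hval]
    have hitems : (d.insert i (sfx (n+1) stages i)).items
        = d.items ++ [(i, sfx (n+1) stages i)] :=
      PySem.Dict.items_insert_of_not_contains _ _ (hfresh i (by omega) le_rfl)
    rw [ih (i-1) (by omega) (by omega) _
      (by
        intro j hj1 hj2
        rw [PySem.Dict.contains_insert]
        have hne : (j == i) = false := by simp; omega
        rw [hne]
        simpa using hfresh j hj1 (by omega))
      (by
        intro _
        have hsucc : i - 1 + 1 = i := by omega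
        rw [hsucc]
        exact PySem.Dict.get?_insert_self _ _ _),
      hitems]
    simp

-- B's forward loop: starting at a with the remaining count sfx a, it appends sfx a, sfx (a+1), …
theorem loopB (top : Int) (stages : List Int) :
    ∀ (k : Nat) (a : Int), a + (k : Int) = top + 1 →
    ∀ (acc : List Int),
      ((PySem.List.pyRange a (top+1)).foldl
        (fun (p : List Int × Int) i => (p.1 ++ [p.2], p.2 - (PySem.Dict.counter stages).getD i 0))
        (acc, sfx top stages a))
        = (acc ++ (PySem.List.pyRange a (top+1)).map (sfx top stages), sfx top stages (top+1)) := by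
  intro k
  induction k with
  | zero =>
    intro a ha acc
    have h : a = top + 1 := by omega
    rw [h, PySem.List.pyRange_one_eq_nil (by omega)]
    simp
  | succ m ih =>
    intro a ha acc
    rw [PySem.List.pyRange_one_cons (by omega)]
    simp only [List.foldl_cons, List.map_cons]
    rw [PySem.Dict.getD_counter]
    have hst : sfx top stages a - (stages.count a : Int) = sfx top stages (a+1) := by
      have := sfx_step top stages a (by omega); omega
    rw [hst, ih (a+1) (by omega) (acc ++ [sfx top stages a])]
    simp

-- sum of per-value counts over a range = one filtered count of the list
theorem countP_interval (lo hi : Int) (stages : List Int) :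
    ((PySem.List.pyRange lo hi).map (fun j => (stages.count j : Int))).sum
      = (stages.countP (fun x => decide (lo ≤ x ∧ x < hi)) : Int) := by
  induction stages with
  | nil => simp
  | cons x xs ih =>
    have hmap : (PySem.List.pyRange lo hi).map (fun j => ((x :: xs).count j : Int))
        = (PySem.List.pyRange lo hi).map
            (fun j => (xs.count j : Int) + (if x == j then 1 else 0)) := by
      apply List.map_congr_left
      intro j _
      rw [List.count_cons]
      push_cast
      split <;> simp
    rw [hmap, PySem.List.sum_map_add_int, ih, PySem.List.sum_map_ite_one_zero]
    have hcnt : (PySem.List.pyRange lo hi).countP (fun j => x == j)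
        = (PySem.List.pyRange lo hi).count x := by
      rw [List.count]
      apply List.countP_congr
      intro j _
      simp only [beq_iff_eq]
      omega
    rw [hcnt, List.Nodup.count (PySem.List.nodup_pyRange_one lo hi), List.countP_cons]
    by_cases hx : lo ≤ x ∧ x < hi
    · rw [if_pos (PySem.List.mem_pyRange_one.mpr hx),
        if_pos (by simp only [decide_eq_true_eq]; exact hx)]
      push_cast; ring
    · rw [if_neg (fun hm => hx (PySem.List.mem_pyRange_one.mp hm)),
        if_neg (by simp only [decide_eq_true_eq]; exact hx)]
      push_cast; ring

-- B's initial remaining count is the full suffix count sfx 1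
theorem reached_eq (top : Int) (stages : List Int) :
    stages.foldl (fun acc x => if 1 ≤ x ∧ x ≤ top then acc + 1 else acc) 0
      = sfx top stages 1 := by
  have h := PySem.List.foldl_count_if (fun x => decide (1 ≤ x ∧ x ≤ top)) stages 0
  simp only [decide_eq_true_eq] at h
  rw [h, sfx, countP_interval]
  have hfun : (fun x => decide (1 ≤ x ∧ x < top + 1)) = (fun x => decide (1 ≤ x ∧ x ≤ top)) := by
    funext x
    simp only [decide_eq_decide]
    omega
  rw [hfun]
  simp

theorem ab_eq (n : Int) (stages : List Int) :
    set_count_and_cum_count n stages = set_count_and_cum_count_alt n stages := by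
  simp only [set_count_and_cum_count, set_count_and_cum_count_alt]
  by_cases h : n + 1 ≤ 0
  · rw [PySem.List.pyRange_neg_one_eq_nil h]
    simp
  · have hpos : 0 < n + 1 := by omega
    -- A side
    have hA := loopA n stages (n+1).toNat (n+1) (by omega) le_rfl PySem.Dict.empty
      (fun j _ _ => PySem.Dict.contains_empty j) (fun h' => absurd h' (lt_irrefl _))
    have hemp : (PySem.Dict.empty : PySem.Dict Int Int).items = [] := rfl
    rw [hemp, List.nil_append] at hA
    rw [hA]
    -- B side: the suffix list
    rw [reached_eq (n+1) stages]
    rw [loopB (n+1) stages (n+1).toNat 1 (by omega) []]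
    simp only [List.nil_append]
    -- B side: the descending comprehension inserts fresh, distinct keys
    rw [PySem.Dict.items_foldl_insert_fresh (PySem.List.pyRange (n+1) 0 (-1)) (fun a => a)
      (fun a => PySem.List.pyGetD ((PySem.List.pyRange 1 (n+1+1)).map (sfx (n+1) stages), sfx (n+1) stages (n+1+1)).1 (a-1) 0)
      PySem.Dict.empty (fun a _ => PySem.Dict.contains_empty a)
      (by
        have hid : List.map (fun a : Int => a) (PySem.List.pyRange (n+1) 0 (-1))
            = PySem.List.pyRange (n+1) 0 (-1) := by simp
        rw [hid, PySem.List.pyRange_neg_one_eq_reverse]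
        exact List.nodup_reverse.mpr (PySem.List.nodup_pyRange_one _ _))]
    rw [hemp, List.nil_append]
    congr 1
    apply List.map_congr_left
    intro i hi
    rw [PySem.List.mem_pyRange_neg_one] at hi
    have hidx : i - 1 = (((i-1).toNat : Nat) : Int) := (Int.toNat_of_nonneg (by omega)).symm
    rw [hidx, PySem.List.pyGetD_map_pyRange_one (sfx (n+1) stages) 1 (n+1+1) (i-1).toNat 0 (by omega)]
    have hcast : (1 : Int) + ((i-1).toNat : Int) = i := by omega
    rw [hcast]

-- ===== VERDICT (by name: the statement is the Claim_ definition above) =====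
theorem set_count_and_cum_count_spec : Claim_equal_set_count_and_cum_count := by
  intro n stages _
  unfold Spec_set_count_and_cum_count
  exact ab_eq n stages
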